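-- pv_equiv track=rewrite | github.com/akikuno/csvtag | src/csvtag/combiner.py | combine_splitted_tags
-- ===== SOURCE A (Python) =====
-- from collections.abc import Iterator
--
-- def _split_csv_tag_by_insertion(csv_tags: Iterator[str]) -> Iterator[str]:
--     for csv_tag in csv_tags:
--         if csv_tag.startswith("+"):  # Insertion
--             yield from csv_tag.split("|")
--         else:
--             yield csv_tag
--
-- def combine_splitted_tags(splitted_csv_tag: Iterator[str]) -> str:
--     """Conbine splitted csv tag
--
--     Args:
--         splitted csv tag (str)
--
--     Returns:
--         str: csv tag
--
--     Examples:
--         >>> splitted_csv_tag = iter(["=A", "+T|+T|+T|=C", "=C", "-A", "-A", "=T", "*AG", "=T", "=T"])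
--         >>> combine_splitted_csv_tag(splitted_csv_tag)
--         "=A+TTT=CC-AA=T*AG=TT"
--
--         >>> splitted_csv_tag = iter(["=A", "=A", "=A", "=N", "=N", "=N", "=N", "=N", "=C", "=C", "=A"])
--         >>> combine_splitted_csv_tag(csv_tag)
--         "=AAANNNNNCCA"
--     """
--     splitted_csv_tag = _split_csv_tag_by_insertion(splitted_csv_tag)
--
--     combined_csv_tags = []
--     prev_csv_tag = next(splitted_csv_tag)
--     prev_prefix = prev_csv_tag[0]
--     combined_csv = [prev_csv_tag[1:]]
--
--     for curr_csv_tag in splitted_csv_tag: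
--         curr_prefix, curr_csv = curr_csv_tag[0], curr_csv_tag[1:]
--         if prev_prefix == curr_prefix:
--             if curr_prefix == "*":
--                 combined_csv.append(curr_csv_tag)
--             else:
--                 combined_csv.append(curr_csv)
--         else:
--             combined_csv_tags.append(prev_prefix + "".join(combined_csv))
--             prev_prefix = curr_prefix
--             combined_csv = [curr_csv]
--
--     combined_csv_tags.append(prev_prefix + "".join(combined_csv))
--     return "".join(combined_csv_tags)
-- ===== SOURCE B (Python) =====
-- def combine_splitted_tags(splitted_csv_tag):
--     expanded = [piece
--                 for tag in splitted_csv_tag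
--                 for piece in (tag.split("|") if tag.startswith("+") else [tag])]
--     # Build the result back-to-front: walk the expanded tags from the right, keeping a stack of
--     # segments (top = leftmost). A segment is (first_tag, chunks) where chunks holds the bodies of
--     # the later members right-to-left; a tag with the same prefix as the segment's first tag is
--     # merged by demoting that first tag to a body chunk.
--     segs = []
--     for tag in reversed(expanded):
--         key = tag[0]
--         if segs and segs[-1][0][0] == key:
--             first, chunks = segs[-1]
--             chunks.append(first if key == "*" else first[1:])
--             segs[-1] = (tag, chunks)
--         else:
--             segs.append((tag, []))
--     return "".join(first + "".join(reversed(chunks))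
--                    for first, chunks in reversed(segs))
-- ===== Notes on version B (the rewrite author's own statement) =====
-- stated objective: alternative
-- what changed: B builds the output back-to-front: it folds the expanded tag list from the right, maintaining a stack of segments (first tag plus its later members' bodies as chunks) and merging each tag into the head segment, instead of A's left-to-right scan with a running prev_prefix and a flush-on-change piece accumulator.
-- crash fix: On an empty input list A raises StopIteration from the initial next(); B naturally returns the empty string there. — e.g. on combine_splitted_tags([]): A raises StopIteration, B returns ""
import Mathlib
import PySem

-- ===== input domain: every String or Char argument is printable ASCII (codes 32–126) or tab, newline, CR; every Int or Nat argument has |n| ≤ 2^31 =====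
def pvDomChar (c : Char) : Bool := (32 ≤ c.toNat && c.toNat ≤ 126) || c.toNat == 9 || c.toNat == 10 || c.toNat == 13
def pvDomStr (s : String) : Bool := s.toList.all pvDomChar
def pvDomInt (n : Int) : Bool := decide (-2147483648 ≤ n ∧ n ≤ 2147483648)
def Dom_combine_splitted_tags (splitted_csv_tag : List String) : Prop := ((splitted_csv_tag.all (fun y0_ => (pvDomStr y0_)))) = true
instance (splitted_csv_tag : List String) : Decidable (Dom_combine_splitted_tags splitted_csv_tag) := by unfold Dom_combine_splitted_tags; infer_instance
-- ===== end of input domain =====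

-- B builds the output back-to-front: a right fold over the expanded tags keeping a stack of
-- segments (first tag + chunk list), merging each tag into the head segment — no running prefix,
-- no flush-on-change (alternative decomposition, same cost).

-- shared totalizations of Python's tag[0] / tag[1:] (Python raises IndexError on tag = ""; Pre_ excludes "")
def pvKey (s : String) : Char := (PySem.Str.pyGet? s 0).getD ' '
def pvTail (s : String) : String := PySem.Str.slice s (some 1) none

-- ===== PORT A =====
-- _split_csv_tag_by_insertion: expand "+"-tags by splitting on "|" ("|".split never yields [], so getD is dead)
def pvSplitByInsertion (csv_tags : List String) : List String :=
  csv_tags.flatMap (fun t => if PySem.Str.startswith t "+" then (PySem.Str.split? t "|").getD [t] else [t])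

-- loop body of A: state = (combined_csv_tags, prev_prefix, combined_csv)
def pvStepA (st : List String × Char × List String) (curr : String) :
    List String × Char × List String :=
  let cp := pvKey curr
  if st.2.1 = cp then
    if cp = '*' then (st.1, st.2.1, st.2.2 ++ [curr])
    else (st.1, st.2.1, st.2.2 ++ [pvTail curr])
  else (st.1 ++ [String.ofList [st.2.1] ++ PySem.Str.join "" st.2.2], cp, [pvTail curr])

-- final flush + outer join of A
def pvFinishA (st : List String × Char × List String) : String :=
  PySem.Str.join "" (st.1 ++ [String.ofList [st.2.1] ++ PySem.Str.join "" st.2.2])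

def combine_splitted_tags (splitted_csv_tag : List String) : String :=
  match pvSplitByInsertion splitted_csv_tag with
  | [] => ""   -- Python raises StopIteration here; excluded by Pre_
  | prev :: rest =>
    pvFinishA (rest.foldl pvStepA ([], pvKey prev, [pvTail prev]))

-- ===== PORT B =====
-- B's loop walks reversed(expanded) pushing/merging onto a stack whose top is the leftmost
-- segment (first_tag, chunks-of-later-member-bodies right-to-left), and finally renders the
-- reversed stack; that is exactly a right fold producing the segment list in output order,
-- merging at the head.
def pvStepB (t : String) (segs : List (String × List String)) : List (String × List String) :=
  match segs with
  | [] => [(t, [])]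
  | (first, chunks) :: rest =>
    if pvKey first = pvKey t then
      (t, chunks ++ [if pvKey t = '*' then first else pvTail first]) :: rest
    else (t, []) :: (first, chunks) :: rest

def combine_splitted_tags_alt (splitted_csv_tag : List String) : String :=
  let expanded := splitted_csv_tag.flatMap
    (fun t => if PySem.Str.startswith t "+" then (PySem.Str.split? t "|").getD [t] else [t])
  PySem.Str.join ""
    ((expanded.foldr pvStepB []).map
      (fun seg => seg.1 ++ PySem.Str.join "" seg.2.reverse))

-- ===== PRECONDITION & SPEC =====
-- Pre_ excludes exactly the inputs where the Python A raises: the empty list (StopIteration from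
-- the initial next()) and inputs whose expanded stream contains an empty tag (IndexError on tag[0]).
def Pre_combine_splitted_tags (splitted_csv_tag : List String) : Prop :=
  pvSplitByInsertion splitted_csv_tag ≠ [] ∧ ∀ s ∈ pvSplitByInsertion splitted_csv_tag, s ≠ ""
instance (splitted_csv_tag : List String) : Decidable (Pre_combine_splitted_tags splitted_csv_tag) := by
  unfold Pre_combine_splitted_tags; infer_instance
def pvWitness_combine_splitted_tags : List String := ["=A", "+T|+T|+T|=C", "=C", "-A", "*AG", "=T"]

-- On an empty input list A raises StopIteration from the initial next(); B naturally returns "".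
def Raises_combine_splitted_tags (splitted_csv_tag : List String) : Prop :=
  splitted_csv_tag = []
instance (splitted_csv_tag : List String) : Decidable (Raises_combine_splitted_tags splitted_csv_tag) := by
  unfold Raises_combine_splitted_tags; infer_instance
def pvRaiseWitness_combine_splitted_tags : List String := []
def pvRaiseWitnessOut_combine_splitted_tags : String := ""

def Spec_combine_splitted_tags (splitted_csv_tag : List String) (out : String) : Prop := out = combine_splitted_tags_alt splitted_csv_tag
instance (splitted_csv_tag : List String) (out : String) : Decidable (Spec_combine_splitted_tags splitted_csv_tag out) := by unfold Spec_combine_splitted_tags; infer_instance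

-- ===== CLAIM (what is proved, stated in full; the proofs are below) =====
def Claim_equal_combine_splitted_tags : Prop := ∀ (splitted_csv_tag : List String), Dom_combine_splitted_tags splitted_csv_tag → Pre_combine_splitted_tags splitted_csv_tag → Spec_combine_splitted_tags splitted_csv_tag (combine_splitted_tags splitted_csv_tag)
def Claim_raises_combine_splitted_tags : Prop := (∀ (splitted_csv_tag : List String), Dom_combine_splitted_tags splitted_csv_tag → Raises_combine_splitted_tags splitted_csv_tag → ¬ Pre_combine_splitted_tags splitted_csv_tag) ∧ (Dom_combine_splitted_tags (pvRaiseWitness_combine_splitted_tags) ∧ Raises_combine_splitted_tags (pvRaiseWitness_combine_splitted_tags) ∧ combine_splitted_tags_alt (pvRaiseWitness_combine_splitted_tags) = pvRaiseWitnessOut_combine_splitted_tags)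

-- ===== LEMMAS AND PROOFS =====

-- the common normal form both ports are reduced to: consecutive runs of equal first character,
-- each rendered as prefix + first[1:] + (members kept whole iff prefix = '*')
def pvGroupRuns : List String → List (Char × List String)
  | [] => []
  | t :: rest =>
    match pvGroupRuns rest with
    | [] => [(pvKey t, [t])]
    | (k, g) :: gs =>
      if pvKey t = k then (k, t :: g) :: gs else (pvKey t, [t]) :: (k, g) :: gs

def pvRenderGroup (p : Char) (g : List String) : String :=
  match g with
  | [] => ""
  | h :: rest =>
    String.ofList [p] ++ pvTail h ++
      PySem.Str.join "" (rest.map (fun t => if p = '*' then t else pvTail t))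

def pvAlt (l : List String) : String :=
  PySem.Str.join "" ((pvGroupRuns l).map (fun pg => pvRenderGroup pg.1 pg.2))

def pvBody (p : Char) : String → String := fun t => if p = '*' then t else pvTail t

theorem pvBody_eq (p : Char) : pvBody p = fun t => if p = '*' then t else pvTail t := rfl

theorem pvJoinEmptyChars : ∀ (xss : List (List Char)), PySem.Chars.join [] xss = xss.flatten := by
  intro xss
  induction xss with
  | nil => simp [PySem.Chars.join_nil]
  | cons x xs ih =>
    cases xs with
    | nil => simp [PySem.Chars.join_singleton]
    | cons y ys =>
      rw [PySem.Chars.join_cons_cons]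
      simp_all

-- s ≠ "" splits as its first character and the rest
theorem pvOfKeyTail (s : String) (h : s ≠ "") :
    String.ofList [pvKey s] ++ pvTail s = s := by
  refine String.toList_inj.mp ?_
  obtain ⟨c, cs, hcc⟩ : ∃ c cs, s.toList = c :: cs := by
    cases hs : s.toList with
    | nil => exact absurd (by simpa using congrArg String.ofList hs) h
    | cons c cs => exact ⟨c, cs, rfl⟩
  simp [pvKey, pvTail, PySem.Str.pyGet?, PySem.Str.slice, hcc, PySem.Chars.pyGet?,
    PySem.Chars.slice, PySem.List.slice_from_one]

theorem pvGroupRuns_cons_eq (t : String) (rest : List String) :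
    pvGroupRuns (t :: rest) =
      (pvKey t, t :: rest.takeWhile (fun s => pvKey s == pvKey t)) ::
        pvGroupRuns (rest.dropWhile (fun s => pvKey s == pvKey t)) := by
  induction rest generalizing t with
  | nil => simp [pvGroupRuns]
  | cons u us ih =>
    have hstep : pvGroupRuns (t :: u :: us) =
        (match pvGroupRuns (u :: us) with
         | [] => [(pvKey t, [t])]
         | (k, g) :: gs =>
           if pvKey t = k then (k, t :: g) :: gs else (pvKey t, [t]) :: (k, g) :: gs) := rfl
    rw [hstep, ih u]
    by_cases h : pvKey u = pvKey t
    · simp [h]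
    · simp [h, Ne.symm h, ih u]

theorem pvAlt_cons (t : String) (rest : List String) :
    pvAlt (t :: rest) =
      pvRenderGroup (pvKey t) (t :: rest.takeWhile (fun s => pvKey s == pvKey t)) ++
        pvAlt (rest.dropWhile (fun s => pvKey s == pvKey t)) := by
  rw [pvAlt, pvGroupRuns_cons_eq]
  refine String.toList_inj.mp ?_
  simp [pvAlt, pvJoinEmptyChars]

-- every group of pvGroupRuns is a nonempty run of members of l carrying the group key
theorem pvGroupRuns_inv : ∀ (n : Nat) (l : List String), l.length ≤ n →
    ∀ pg ∈ pvGroupRuns l, pg.2 ≠ [] ∧ ∀ s ∈ pg.2, s ∈ l ∧ pvKey s = pg.1 := by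
  intro n
  induction n with
  | zero =>
    intro l hl
    have : l = [] := List.eq_nil_of_length_eq_zero (Nat.le_zero.mp hl)
    subst this
    simp [pvGroupRuns]
  | succ n ih =>
    intro l hl pg hpg
    cases l with
    | nil => simp [pvGroupRuns] at hpg
    | cons t rest =>
      rw [pvGroupRuns_cons_eq] at hpg
      rcases List.mem_cons.mp hpg with hpg | hpg
      · subst hpg
        refine ⟨by simp, ?_⟩
        intro s hs
        rcases List.mem_cons.mp hs with hs | hs
        · subst hs; exact ⟨by simp, rfl⟩
        · refine ⟨by simp [(List.takeWhile_sublist _).subset hs], ?_⟩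
          have := List.mem_takeWhile_imp hs
          simpa using this
      · have hlen : (rest.dropWhile (fun s => pvKey s == pvKey t)).length ≤ n := by
          have h1 := List.length_dropWhile_le (p := fun s => pvKey s == pvKey t) (l := rest)
          simp at hl; omega
        obtain ⟨h1, h2⟩ := ih _ hlen pg hpg
        refine ⟨h1, fun s hs => ⟨?_, (h2 s hs).2⟩⟩
        exact List.mem_cons_of_mem t ((List.dropWhile_sublist _).subset (h2 s hs).1)

-- the encoded form of one run that B's stack carries
def pvEncode (pg : Char × List String) : String × List String :=
  match pg.2 with
  | [] => ("", [])
  | h :: rest => (h, (rest.map (pvBody pg.1)).reverse)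

-- B's right fold computes exactly the encoded runs
theorem pvFoldrB (l : List String) :
    l.foldr pvStepB [] = (pvGroupRuns l).map pvEncode := by
  induction l with
  | nil => simp [pvGroupRuns]
  | cons t rest ih =>
    rw [List.foldr_cons, ih]
    rw [show pvGroupRuns (t :: rest) =
        (match pvGroupRuns rest with
         | [] => [(pvKey t, [t])]
         | (k, g) :: gs =>
           if pvKey t = k then (k, t :: g) :: gs else (pvKey t, [t]) :: (k, g) :: gs) from rfl]
    cases hr : pvGroupRuns rest with
    | nil => simp [pvStepB, pvEncode]
    | cons p ps =>
      obtain ⟨k, g⟩ := p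
      obtain ⟨hgne, hmem⟩ :=
        pvGroupRuns_inv rest.length rest le_rfl (k, g) (by rw [hr]; simp)
      obtain ⟨h0, grest, hg⟩ : ∃ h0 grest, g = h0 :: grest := by
        cases g with
        | nil => exact absurd rfl hgne
        | cons a b => exact ⟨a, b, rfl⟩
      subst hg
      have hkh0 : pvKey h0 = k := (hmem h0 (by simp)).2
      have hred : (match ((k, h0 :: grest) :: ps : List (Char × List String)) with
          | [] => [(pvKey t, [t])]
          | (q, g) :: gs => if pvKey t = q then (q, t :: g) :: gs
                            else (pvKey t, [t]) :: (q, g) :: gs)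
          = if pvKey t = k then (k, t :: (h0 :: grest)) :: ps
            else (pvKey t, [t]) :: (k, h0 :: grest) :: ps := rfl
      rw [hred]
      by_cases hkt : pvKey t = k
      · rw [if_pos hkt]
        simp only [List.map_cons, pvEncode, pvStepB, hkh0]
        rw [if_pos hkt.symm]
        simp [pvBody, hkt]
      · rw [if_neg hkt]
        simp only [List.map_cons, pvEncode, pvStepB, hkh0]
        rw [if_neg (fun hc => hkt hc.symm)]
        rfl

theorem pvAbsorb (run : List String) (rest tags : List String) (pp : Char) (cc : List String)
    (h : ∀ s ∈ run, pvKey s = pp) :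
    (run ++ rest).foldl pvStepA (tags, pp, cc) =
      rest.foldl pvStepA (tags, pp, cc ++ run.map (pvBody pp)) := by
  induction run generalizing cc with
  | nil => simp
  | cons t ts ih =>
    have ht : pvKey t = pp := h t (by simp)
    have hts : ∀ s ∈ ts, pvKey s = pp := fun s hs => h s (by simp [hs])
    simp only [List.cons_append, List.foldl_cons]
    rw [show pvStepA (tags, pp, cc) t = (tags, pp, cc ++ [pvBody pp t]) by
      simp [pvStepA, pvBody, ht]; split_ifs <;> simp_all]
    rw [ih _ hts]
    simp

theorem pvMain : ∀ (n : Nat) (l : List String), l.length ≤ n →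
    ∀ (tags : List String) (pp : Char) (cc : List String),
    pvFinishA (l.foldl pvStepA (tags, pp, cc)) =
      PySem.Str.join "" tags ++ String.ofList [pp] ++ PySem.Str.join "" cc ++
        PySem.Str.join "" ((l.takeWhile (fun s => pvKey s == pp)).map (pvBody pp)) ++
        pvAlt (l.dropWhile (fun s => pvKey s == pp)) := by
  intro n
  induction n with
  | zero =>
    intro l hl tags pp cc
    have : l = [] := List.eq_nil_of_length_eq_zero (Nat.le_zero.mp hl)
    subst this
    refine String.toList_inj.mp ?_
    simp [pvFinishA, pvAlt, pvGroupRuns, pvJoinEmptyChars]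
  | succ n ih =>
    intro l hl tags pp cc
    have hsplit := List.takeWhile_append_dropWhile (p := fun s => pvKey s == pp) (l := l)
    set run := l.takeWhile (fun s => pvKey s == pp) with hrun
    set dr := l.dropWhile (fun s => pvKey s == pp) with hdr
    have hmem : ∀ s ∈ run, pvKey s = pp := by
      intro s hs
      have := List.mem_takeWhile_imp hs
      simpa using this
    rw [← hsplit, pvAbsorb run dr tags pp cc hmem]
    cases hd : dr with
    | nil =>
      refine String.toList_inj.mp ?_
      simp [pvFinishA, pvAlt, pvGroupRuns, pvJoinEmptyChars]
    | cons h' rest'' =>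
      have hkey : (pvKey h' == pp) = false := by
        have h0 := List.head?_dropWhile_not (fun s => pvKey s == pp) l
        rw [← hdr, hd] at h0
        simpa using h0
      have hkey' : pvKey h' ≠ pp := by simpa using hkey
      have hlen : rest''.length ≤ n := by
        have : l.length = run.length + (h' :: rest'').length := by
          rw [← hsplit, hd]; simp
        simp [this] at hl; omega
      simp only [List.foldl_cons]
      rw [show pvStepA (tags, pp, cc ++ run.map (pvBody pp)) h' =
            (tags ++ [String.ofList [pp] ++ PySem.Str.join "" (cc ++ run.map (pvBody pp))],
              pvKey h', [pvTail h']) by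
        simp [pvStepA, Ne.symm hkey']]
      rw [ih rest'' hlen]
      have halt : pvAlt (h' :: rest'') =
          String.ofList [pvKey h'] ++ pvTail h' ++
            PySem.Str.join "" ((rest''.takeWhile (fun s => pvKey s == pvKey h')).map (pvBody (pvKey h'))) ++
            pvAlt (rest''.dropWhile (fun s => pvKey s == pvKey h')) := by
        rw [pvAlt_cons]
        refine String.toList_inj.mp ?_
        simp [pvRenderGroup, pvJoinEmptyChars, pvBody_eq]
      rw [halt]
      refine String.toList_inj.mp ?_
      simp [pvJoinEmptyChars]

-- A reduces to the rendered runs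
theorem pvA_eq (xs : List String) (h : pvSplitByInsertion xs ≠ []) :
    combine_splitted_tags xs = pvAlt (pvSplitByInsertion xs) := by
  unfold combine_splitted_tags
  cases hE : pvSplitByInsertion xs with
  | nil => exact absurd hE h
  | cons prev rest =>
    show pvFinishA (rest.foldl pvStepA ([], pvKey prev, [pvTail prev])) = _
    rw [pvMain rest.length rest le_rfl]
    rw [pvAlt_cons]
    refine String.toList_inj.mp ?_
    simp [pvRenderGroup, pvJoinEmptyChars, pvBody_eq]

-- B reduces to the rendered runs
theorem pvB_eq (xs : List String) (hne : ∀ s ∈ pvSplitByInsertion xs, s ≠ "") :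
    combine_splitted_tags_alt xs = pvAlt (pvSplitByInsertion xs) := by
  show PySem.Str.join ""
      (((pvSplitByInsertion xs).foldr pvStepB []).map
        (fun seg => seg.1 ++ PySem.Str.join "" seg.2.reverse)) =
    pvAlt (pvSplitByInsertion xs)
  rw [pvAlt, pvFoldrB, List.map_map]
  congr 1
  apply List.map_congr_left
  intro pg hpg
  obtain ⟨hgne, hmem⟩ :=
    pvGroupRuns_inv (pvSplitByInsertion xs).length _ le_rfl pg hpg
  obtain ⟨k, g⟩ := pg
  obtain ⟨h0, grest, hg⟩ : ∃ h0 grest, g = h0 :: grest := by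
    cases g with
    | nil => exact absurd rfl hgne
    | cons a b => exact ⟨a, b, rfl⟩
  subst hg
  have hh0 : h0 ≠ "" := hne h0 (hmem h0 (by simp)).1
  have hkh0 : pvKey h0 = k := (hmem h0 (by simp)).2
  have hh' : h0.toList = k :: (pvTail h0).toList := by
    conv_lhs => rw [← pvOfKeyTail h0 hh0]
    simp [hkh0]
  refine String.toList_inj.mp ?_
  simp only [Function.comp, pvEncode, pvRenderGroup, pvBody_eq]
  simp [pvJoinEmptyChars, hh']

-- ===== VERDICT (by name: the statement is the Claim_ definition above) =====
theorem combine_splitted_tags_spec : Claim_equal_combine_splitted_tags := by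
  intro xs _ hpre
  unfold Spec_combine_splitted_tags
  rw [pvA_eq xs hpre.1, pvB_eq xs hpre.2]

theorem combine_splitted_tags_raises : Claim_raises_combine_splitted_tags := by
  unfold Claim_raises_combine_splitted_tags
  refine ⟨?_, by decide⟩
  intro xs _ hr hpre
  subst hr
  exact hpre.1 (by rfl)

-- witness self-check: B's port really returns the stated literal on the raise witness
theorem pvRaiseWitness_ok :
    combine_splitted_tags_alt pvRaiseWitness_combine_splitted_tags =
      pvRaiseWitnessOut_combine_splitted_tags :=
  combine_splitted_tags_raises.2.2.2
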